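-- pv_equiv track=rewrite | github.com/okube-ai/laktory | scripts/build_resources/00_fetch.py | build_resource_descriptions
-- ===== SOURCE A (Python) =====
-- def build_resource_descriptions(
--     all_structs: dict[str, dict[str, str]],
--     primary: str,
--     fallbacks: list[str],
-- ) -> dict[str, str]:
--     result = dict(all_structs.get(primary, {}))
--     for fb in fallbacks:
--         for attr, desc in all_structs.get(fb, {}).items():
--             if attr not in result:
--                 result[attr] = desc
--     return result
-- ===== SOURCE B (Python) =====
-- def _first_value(sources, attr):
--     for m in sources:
--         if attr in m:
--             return m[attr]
--
--
-- def build_resource_descriptions(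
--     all_structs: dict[str, dict[str, str]],
--     primary: str,
--     fallbacks: list[str],
-- ) -> dict[str, str]:
--     sources = [all_structs.get(src, {}) for src in (primary, *fallbacks)]
--     order = dict.fromkeys(attr for m in sources for attr in m)
--     return {attr: _first_value(sources, attr) for attr in order}
-- ===== Notes on version B (the rewrite author's own statement) =====
-- stated objective: alternative
-- what changed: A merges incrementally into a growing dict with an 'if attr not in result' guard; B never merges: it first computes the ordered key set (dict.fromkeys over all sources' keys in priority order) and then resolves each key independently by a ChainMap-style scan of the source list for the first source containing it.
import Mathlib
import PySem

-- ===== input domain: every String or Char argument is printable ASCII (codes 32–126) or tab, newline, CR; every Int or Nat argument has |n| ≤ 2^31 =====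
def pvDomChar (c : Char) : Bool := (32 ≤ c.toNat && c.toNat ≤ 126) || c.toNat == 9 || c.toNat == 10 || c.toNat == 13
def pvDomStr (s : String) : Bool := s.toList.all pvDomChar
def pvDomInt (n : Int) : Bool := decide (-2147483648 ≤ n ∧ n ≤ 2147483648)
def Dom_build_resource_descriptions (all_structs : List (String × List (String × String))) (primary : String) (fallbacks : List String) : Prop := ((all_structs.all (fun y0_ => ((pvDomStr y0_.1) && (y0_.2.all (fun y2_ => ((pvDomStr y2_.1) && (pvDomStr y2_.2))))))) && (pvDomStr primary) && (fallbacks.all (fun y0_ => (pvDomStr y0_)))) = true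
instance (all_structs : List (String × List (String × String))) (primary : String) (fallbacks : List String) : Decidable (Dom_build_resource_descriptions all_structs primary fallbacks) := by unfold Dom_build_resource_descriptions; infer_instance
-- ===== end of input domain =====

-- B replaces A's guarded incremental merge by a two-phase resolution: compute the
-- priority-ordered key set, then look each key up in the first source that has it.

-- all_structs.get(s, {})  — shared lookup helper (both Pythons perform this dict lookup)
def pvGetStructs (all_structs : List (String × List (String × String))) (s : String) : List (String × String) :=
  (PySem.Dict.mk all_structs).getD s []

-- ===== PORT A =====
-- loop body of A: 'if attr not in result: result[attr] = desc'
def pvStepA (r : PySem.Dict String String) (p : String × String) : PySem.Dict String String :=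
  if r.contains p.1 then r else r.insert p.1 p.2

def build_resource_descriptions (all_structs : List (String × List (String × String))) (primary : String) (fallbacks : List String) : List (String × String) :=
  let result := PySem.Dict.ofList (pvGetStructs all_structs primary)
  (fallbacks.foldl (fun result fb => (pvGetStructs all_structs fb).foldl pvStepA result) result).items

-- ===== PORT B =====
-- _first_value(sources, attr): first source containing attr wins; Python returns None when no
-- source contains attr, which is unreachable because attrs are drawn from the sources — "" here.
def pvFirstValue (sources : List (List (String × String))) (attr : String) : String :=
  match sources with
  | [] => ""
  | m :: rest =>
      if (PySem.Dict.mk m).contains attr then (PySem.Dict.mk m).getD attr ""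
      else pvFirstValue rest attr

def build_resource_descriptions_alt (all_structs : List (String × List (String × String))) (primary : String) (fallbacks : List String) : List (String × String) :=
  let sources := (primary :: fallbacks).map (pvGetStructs all_structs)
  let order := PySem.List.dedup (sources.flatMap (fun m => (PySem.Dict.mk m).keys))
  (PySem.Dict.ofList (order.map (fun attr => (attr, pvFirstValue sources attr)))).items

-- ===== PRECONDITION & SPEC =====
-- Pre_ is the Python-dict representation invariant only: the inner association lists stand for
-- dicts, so their keys are distinct; no actual Python input is excluded.
def Pre_build_resource_descriptions (all_structs : List (String × List (String × String))) (primary : String) (fallbacks : List String) : Prop :=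
  ∀ p ∈ all_structs, (p.2.map Prod.fst).Nodup
instance (all_structs : List (String × List (String × String))) (primary : String) (fallbacks : List String) : Decidable (Pre_build_resource_descriptions all_structs primary fallbacks) := by unfold Pre_build_resource_descriptions; infer_instance

def pvWitness_build_resource_descriptions : (List (String × List (String × String))) × String × List String :=
  ([("a", [("x", "1"), ("y", "2")]), ("b", [("x", "0"), ("z", "3")])], "a", ["b"])

def Spec_build_resource_descriptions (all_structs : List (String × List (String × String))) (primary : String) (fallbacks : List String) (out : List (String × String)) : Prop := out = build_resource_descriptions_alt all_structs primary fallbacks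
instance (all_structs : List (String × List (String × String))) (primary : String) (fallbacks : List String) (out : List (String × String)) : Decidable (Spec_build_resource_descriptions all_structs primary fallbacks out) := by unfold Spec_build_resource_descriptions; infer_instance

-- ===== CLAIM (what is proved, stated in full; the proofs are below) =====
def Claim_equal_build_resource_descriptions : Prop := ∀ (all_structs : List (String × List (String × String))) (primary : String) (fallbacks : List String), Dom_build_resource_descriptions all_structs primary fallbacks → Pre_build_resource_descriptions all_structs primary fallbacks → Spec_build_resource_descriptions all_structs primary fallbacks (build_resource_descriptions all_structs primary fallbacks)

-- ===== LEMMAS AND PROOFS =====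

-- value at the first pair of l whose key is k ("" when absent) — the first-wins value of a stream
def pvFindVal (l : List (String × String)) (k : String) : String :=
  ((l.find? (fun p => p.1 == k)).map Prod.snd).getD ""

-- A's first-wins fold records exactly the first-occurrence keys, in order
theorem pv_fw_keys (l : List (String × String)) (d : PySem.Dict String String) :
    (l.foldl pvStepA d).keys = PySem.Set.update d.keys (l.map Prod.fst) := by
  induction l generalizing d with
  | nil => simp [PySem.Set.update]
  | cons p t ih =>
    simp only [List.foldl_cons, List.map_cons, PySem.Set.update] at *
    rw [ih]
    congr 1
    by_cases h : d.contains p.1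
    · have hm : p.1 ∈ d.keys := (PySem.Dict.contains_iff_mem_keys d p.1).mp h
      simp [pvStepA, h, PySem.Set.add, hm]
    · have h' : d.contains p.1 = false := by simpa using h
      have hm : p.1 ∉ d.keys := fun hmem => h ((PySem.Dict.contains_iff_mem_keys d p.1).mpr hmem)
      simp [pvStepA, h', PySem.Set.add, hm, PySem.Dict.keys_insert_of_not_contains d p.2 h']

-- A's first-wins fold stores, for each key, the value of its first occurrence in the stream
theorem pv_fw_getD (l : List (String × String)) (d : PySem.Dict String String) (k : String) :
    (l.foldl pvStepA d).getD k "" = if d.contains k then d.getD k "" else pvFindVal l k := by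
  induction l generalizing d with
  | nil =>
    by_cases h : d.contains k
    · simp [h]
    · have h' : d.contains k = false := by simpa using h
      simp [pvFindVal, h', PySem.Dict.getD_of_not_contains d "" h']
  | cons p t ih =>
    simp only [List.foldl_cons]
    rw [ih]
    by_cases hpk : p.1 = k
    · subst hpk
      by_cases h : d.contains p.1
      · simp [pvStepA, h]
      · have h' : d.contains p.1 = false := by simpa using h
        simp [pvStepA, h', PySem.Dict.contains_insert_self, PySem.Dict.getD_insert_self, pvFindVal]
    · have hbeq : (p.1 == k) = false := by simpa using hpk
      have hfv : pvFindVal (p :: t) k = pvFindVal t k := by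
        simp [pvFindVal, hbeq]
      rw [hfv]
      by_cases h : d.contains p.1
      · simp [pvStepA, h]
      · have h' : d.contains p.1 = false := by simpa using h
        have hkp : (k == p.1) = false := by simpa using (Ne.symm hpk)
        have hc : (d.insert p.1 p.2).contains k = d.contains k := by
          rw [PySem.Dict.contains_insert, hkp, Bool.false_or]
        simp only [pvStepA, h', Bool.false_eq_true, if_false, hc]
        by_cases hk : d.contains k
        · simp [hk, PySem.Dict.getD_insert_of_ne d p.2 "" (Ne.symm hpk)]
        · simp [hk]

-- B's per-key source scan computes the first-wins value of the flattened stream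
theorem pv_firstValue_eq_findVal (sources : List (List (String × String))) (k : String) :
    pvFirstValue sources k = pvFindVal sources.flatten k := by
  induction sources with
  | nil => simp [pvFirstValue, pvFindVal]
  | cons m rest ih =>
    simp only [pvFirstValue, List.flatten_cons]
    by_cases h : (PySem.Dict.mk m).contains k
    · rw [if_pos h]
      have hfind : (m.find? (fun p => p.1 == k)).isSome := by
        rw [List.find?_isSome]
        simpa only [PySem.Dict.contains_mk, List.any_eq_true] using h
      obtain ⟨q, hq⟩ := Option.isSome_iff_exists.mp hfind
      simp [pvFindVal, List.find?_append, hq, PySem.Dict.getD, PySem.Dict.get?]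
    · rw [if_neg h]
      have h' : (PySem.Dict.mk m).contains k = false := by
        simp only [Bool.not_eq_true] at h; exact h
      have hany : ∀ q ∈ m, ¬ (q.1 == k) = true := by
        rw [PySem.Dict.contains_mk] at h'; exact List.any_eq_false.mp h' 
      have hfind : m.find? (fun p => p.1 == k) = none := List.find?_eq_none.mpr hany
      simp [ih, pvFindVal, List.find?_append, hfind]

-- A's first-wins inner loop over a duplicate-free layer = bulk update with the new keys
theorem pv_layer_eq_update (l : List (String × String)) (hnd : (l.map Prod.fst).Nodup)
    (d : PySem.Dict String String) :
    l.foldl pvStepA d = d.update (l.filter (fun p => !d.contains p.1)) := by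
  induction l generalizing d with
  | nil => simp [PySem.Dict.update]
  | cons p l ih =>
    simp only [List.map_cons, List.nodup_cons] at hnd
    have htail := ih hnd.2
    simp only [List.foldl_cons, List.filter_cons]
    by_cases h : d.contains p.1
    · simpa [pvStepA, h] using htail d
    · have h' : d.contains p.1 = false := by simpa using h
      simp only [pvStepA, h', Bool.not_false, if_true, Bool.false_eq_true, if_false]
      rw [htail (d.insert p.1 p.2)]
      have hfil : l.filter (fun q => !(d.insert p.1 p.2).contains q.1)
          = l.filter (fun q => !d.contains q.1) := by
        apply List.filter_congr
        intro q hq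
        have hne : q.1 ≠ p.1 := by
          intro he; exact hnd.1 (he ▸ List.mem_map_of_mem hq)
        rw [PySem.Dict.contains_insert]
        simp [hne]
      rw [hfil]
      simp [PySem.Dict.update]

-- first-wins fold from the empty dict over a duplicate-free list = dict(l)
theorem pv_foldl_empty_eq_ofList (l : List (String × String)) (hnd : (l.map Prod.fst).Nodup) :
    l.foldl pvStepA PySem.Dict.empty = PySem.Dict.ofList l := by
  rw [pv_layer_eq_update l hnd PySem.Dict.empty, PySem.Dict.ofList]
  congr 1
  exact List.filter_eq_self.mpr (fun p _ => by simp [PySem.Dict.contains_empty])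

-- each looked-up layer satisfies the Nodup invariant under Pre_
theorem pv_lookup_nodup (all_structs : List (String × List (String × String)))
    (hpre : ∀ p ∈ all_structs, (p.2.map Prod.fst).Nodup) (s : String) :
    ((pvGetStructs all_structs s).map Prod.fst).Nodup := by
  unfold pvGetStructs PySem.Dict.getD PySem.Dict.get?
  cases hf : List.find? (fun p => p.1 == s) (PySem.Dict.mk all_structs).items with
  | none => simp
  | some p =>
    have hp : p ∈ all_structs := List.mem_of_find?_eq_some hf
    simpa [hf] using hpre p hp

-- ===== VERDICT (by name: the statement is the Claim_ definition above) =====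
theorem build_resource_descriptions_spec : Claim_equal_build_resource_descriptions := by
  intro all_structs primary fallbacks _ hpre
  set sources := (primary :: fallbacks).map (pvGetStructs all_structs) with hsrc
  show (fallbacks.foldl (fun result fb => (pvGetStructs all_structs fb).foldl pvStepA result)
      (PySem.Dict.ofList (pvGetStructs all_structs primary))).items
    = (PySem.Dict.ofList ((PySem.List.dedup (sources.flatMap (fun m => (PySem.Dict.mk m).keys))).map
        (fun attr => (attr, pvFirstValue sources attr)))).items
  -- A = first-wins fold of the flattened source stream from the empty dict
  have hA : (fallbacks.foldl (fun result fb => (pvGetStructs all_structs fb).foldl pvStepA result)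
      (PySem.Dict.ofList (pvGetStructs all_structs primary)))
      = sources.flatten.foldl pvStepA PySem.Dict.empty := by
    rw [hsrc, List.map_cons, List.flatten_cons, List.foldl_append, List.foldl_flatten,
      List.foldl_map, pv_foldl_empty_eq_ofList _ (pv_lookup_nodup all_structs hpre primary)]
  rw [hA]
  set F := sources.flatten.foldl pvStepA PySem.Dict.empty with hF
  -- its keys are the first-occurrence key order B computes
  have hkeys : F.keys = PySem.List.dedup (sources.flatMap (fun m => (PySem.Dict.mk m).keys)) := by
    rw [hF, pv_fw_keys, PySem.Dict.keys_empty]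
    simp [PySem.List.dedup, PySem.Set.ofList, PySem.Set.update, PySem.Set.empty,
      List.flatMap_def, List.map_flatten, PySem.Dict.keys_mk]
  have hnodup : F.keys.Nodup := hkeys ▸ PySem.List.nodup_dedup _
  -- its items are those keys paired with B's per-key first-source values
  have hitems : F.items = (PySem.List.dedup (sources.flatMap (fun m => (PySem.Dict.mk m).keys))).map
      (fun attr => (attr, pvFirstValue sources attr)) := by
    rw [PySem.Dict.items_eq_map_keys F hnodup "", hkeys]
    apply List.map_congr_left
    intro k _
    rw [hF, pv_fw_getD, PySem.Dict.contains_empty, pv_firstValue_eq_findVal]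
    simp
  -- B's ofList over distinct keys returns exactly that pair list
  have hmapfst : (((PySem.List.dedup (sources.flatMap (fun m => (PySem.Dict.mk m).keys))).map
      (fun attr => (attr, pvFirstValue sources attr))).map Prod.fst)
      = PySem.List.dedup (sources.flatMap (fun m => (PySem.Dict.mk m).keys)) := by
    rw [List.map_map]; exact List.map_id' _
  have hnodup2 := hmapfst ▸ PySem.List.nodup_dedup (sources.flatMap (fun m => (PySem.Dict.mk m).keys))
  rw [hitems, PySem.Dict.ofList, PySem.Dict.update]
  rw [PySem.Dict.items_foldl_insert_fresh
    ((PySem.List.dedup (sources.flatMap (fun m => (PySem.Dict.mk m).keys))).map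
      (fun attr => (attr, pvFirstValue sources attr)))
    Prod.fst Prod.snd PySem.Dict.empty
    (fun a _ => PySem.Dict.contains_empty a.1) hnodup2]
  simp [PySem.Dict.empty]
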